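-- pv_equiv track=rewrite | github.com/Randall-Holmes/Randall-Holmes.github.io | Lestrade/Lestrade and Automath (backups)/automath/automath-flagship-3-28.py | Getident
-- ===== SOURCE A (Python) =====
-- def isupper(l):  return l <= 'Z' and l >= 'A'
--
-- def islower(l):  return l <= 'z' and l >= 'a'
--
-- def isdigit(l):  return (l <= '9' and l>='0')
--
-- def isident(s):
--
--     #return islowerident(s) or ((len(s)>0) and isupper(s[0]) and ((len(s)==1) or isident(s[1:]) or (len(s)==2 and (s[1]=='$' or s[1]=='!'))))
--     return (len(s)>0 and (isdigit(s[0]) or isupper(s[0]) or islower(s[0]) or s[0]=='#') and ((len(s)==1) or (len(s)==2 and (s[1]=='$' or s[1]=='!')) or isident(s[1:])))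
--
-- def Getident0(s,n):
--     if s[0:1]=="'":
--         i=1
--         while(len(s)>i and not(s[i]=="'")):
--             i=i+1
--         if s[i]=="'":  return s[0:i+1]
--         return 'ERROR'
--     if s[0:1]=='~' and isident(s[1:]): return Getident0(s[1:],n)
--     if isident(s):  return s
--     if not isident(s[0:n]):  return 'ERROR'
--     if not isident(s[0:n+1]):  return s[0:n]
--     return Getident0(s,n+1)
--
-- def Getident(s):
--     A=Getident0(s,1)
--     if A=='ERROR':  return 'ERROR'
--     R=s[len(A):]
--     if not R[0:1]=='"':  return A
--     RR = R[1:]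
--     while not RR == '' and not RR[0:1]=='"':
--         RR=RR[1:]
--     if RR == '': return 'ERROR'
--     return A+R[0:len(R)-len(RR)+1]
-- ===== SOURCE B (Python) =====
-- # Single linear scan: quoted token via str.find, identifier token via one pass counting
-- # leading core chars (plus optional trailing '$'/'!'), optional "..." suffix via str.find;
-- # no recursion and no repeated prefix re-checks.
--
-- def _core(c):
--     return '0' <= c <= '9' or 'A' <= c <= 'Z' or 'a' <= c <= 'z' or c == '#'
--
-- def _is_ident(t):
--     # nonempty; every char core except the last, which may also be '$' or '!' when len >= 2
--     return bool(t) and all(_core(c) for c in t[:-1]) and (_core(t[-1]) or (len(t) >= 2 and t[-1] in "$!"))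
--
-- def Getident(s):
--     if s[:1] == "'":
--         j = s.find("'", 1)
--         if j == -1:
--             return 'ERROR'
--         a = s[:j + 1]
--     elif s[:1] == '~' and _is_ident(s[1:]):
--         return s[1:]
--     else:
--         k = 0
--         for c in s:
--             if not _core(c):
--                 break
--             k += 1
--         if k == 0:
--             return 'ERROR'
--         if k < len(s) and s[k] in "$!":
--             k += 1
--         a = s[:k]
--     r = s[len(a):]
--     if r[:1] != '"':
--         return a
--     j = r.find('"', 1)
--     if j == -1:
--         return 'ERROR'
--     return a + r[:j + 1]
-- ===== Notes on version B (the rewrite author's own statement) =====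
-- stated objective: faster
-- what changed: Replaced the n-incrementing recursion that re-validates every prefix s[0:n] with a recursive isident check (quadratic-plus) by one linear scan counting leading identifier chars (plus optional trailing '$'/'!'), with str.find for the quote scans.
-- intended difference: On inputs whose leading identifier token is exactly 'ERROR' followed by a terminated double-quoted segment (e.g. 'ERROR"x"'), A returns 'ERROR' because the legitimate token collides with A's in-band error sentinel and the suffix is dropped; B returns the full token 'ERROR"x"', which is the intended value. — e.g. on Getident("ERROR\"x\""): A returns "ERROR", B returns "ERROR\"x\""
-- crash fix: On strings starting with a single quote that never closes (e.g. "'a"), A raises IndexError; B returns 'ERROR'. — e.g. on Getident("'a"): A raises IndexError, B returns "ERROR"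
import Mathlib
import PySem

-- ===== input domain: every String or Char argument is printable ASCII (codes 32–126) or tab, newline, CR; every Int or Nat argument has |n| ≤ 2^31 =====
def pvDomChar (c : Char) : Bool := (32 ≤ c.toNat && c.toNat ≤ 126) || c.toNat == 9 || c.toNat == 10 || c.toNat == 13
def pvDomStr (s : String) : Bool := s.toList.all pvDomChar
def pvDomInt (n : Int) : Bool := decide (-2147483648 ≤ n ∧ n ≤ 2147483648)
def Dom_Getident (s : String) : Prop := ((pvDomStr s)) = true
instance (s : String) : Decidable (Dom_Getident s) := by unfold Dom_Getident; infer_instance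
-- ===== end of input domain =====

-- B replaces A's prefix-revalidating recursion by one linear scan (measured asymptotically faster);
-- on tokens literally equal to A's in-band 'ERROR' sentinel B keeps the quote suffix (see D_ below).


-- the literal string 'ERROR' both programs use
def ERRORs : List Char := ['E', 'R', 'R', 'O', 'R']

-- ===== PORT A =====
def isupperA (c : Char) : Bool := c ≤ 'Z' && 'A' ≤ c
def islowerA (c : Char) : Bool := c ≤ 'z' && 'a' ≤ c
def isdigitA (c : Char) : Bool := c ≤ '9' && '0' ≤ c

def isidentA : List Char → Bool
  | [] => false
  | c :: rest =>
    (isdigitA c || isupperA c || islowerA c || c == '#') &&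
      (decide (rest.length = 0) ||
        (decide (rest.length = 1) && (rest.headD ' ' == '$' || rest.headD ' ' == '!')) ||
        isidentA rest)

-- the while loop 'while(len(s)>i and not(s[i]=="'")): i=i+1'
def scanQuoteA (s : List Char) (i : Nat) : Nat :=
  if h : i < s.length ∧ ¬ s[i]? = some '\'' then scanQuoteA s (i + 1) else i
termination_by s.length - i
decreasing_by omega

def Getident0A : Nat → List Char → Nat → List Char
  | 0, _, _ => ERRORs        -- fuel guard only; never reached from GetidentL's call
  | fuel + 1, s, n =>
    if s.take 1 = ['\''] then
      let i := scanQuoteA s 1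
      match s[i]? with
      | some c => if c = '\'' then s.take (i + 1) else ERRORs
      | none => ERRORs       -- Python raises IndexError here; Pre_ excludes these inputs
    else if s.take 1 = ['~'] ∧ isidentA (s.drop 1) = true then Getident0A fuel (s.drop 1) n
    else if isidentA s then s
    else if ¬ isidentA (s.take n) then ERRORs
    else if ¬ isidentA (s.take (n + 1)) then s.take n
    else Getident0A fuel s (n + 1)

-- the while loop 'while not RR == '' and not RR[0:1]=='"': RR=RR[1:]'
def scanRRA (rr : List Char) : List Char :=
  if rr ≠ [] ∧ rr.take 1 ≠ ['"'] then scanRRA (rr.drop 1) else rr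
termination_by rr.length
decreasing_by cases rr with
  | nil => simp_all
  | cons c t => simp

def GetidentL (l : List Char) : List Char :=
  let A := Getident0A (l.length + 2) l 1
  if A = ERRORs then ERRORs
  else
    let R := l.drop A.length
    if ¬ R.take 1 = ['"'] then A
    else
      let RR := scanRRA (R.drop 1)
      if RR = [] then ERRORs
      else A ++ R.take (R.length - RR.length + 1)

def Getident (s : String) : String := String.ofList (GetidentL s.toList)

-- ===== PORT B =====
def coreB (c : Char) : Bool :=
  ('0' ≤ c && c ≤ '9') || ('A' ≤ c && c ≤ 'Z') || ('a' ≤ c && c ≤ 'z') || c == '#'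

def isIdentB (t : List Char) : Bool :=
  match t.getLast? with
  | none => false
  | some c => t.dropLast.all coreB && (coreB c || (decide (t.length ≥ 2) && (c == '$' || c == '!')))

-- 'for c in s: if not _core(c): break; k += 1'
def countCoreB : List Char → Nat
  | [] => 0
  | c :: t => if coreB c then countCoreB t + 1 else 0

-- shared tail of Source B after the token a is known: optional terminated "..." suffix
def suffixB (l a : List Char) : List Char :=
  let r := l.drop a.length
  if r.take 1 ≠ ['"'] then a
  else
    let j := PySem.Chars.findFrom r ['"'] 1 none
    if j = -1 then ERRORs else a ++ r.take (j.toNat + 1)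

def GetidentAltL (l : List Char) : List Char :=
  if l.take 1 = ['\''] then
    let j := PySem.Chars.findFrom l ['\''] 1 none
    if j = -1 then ERRORs else suffixB l (l.take (j.toNat + 1))
  else if l.take 1 = ['~'] ∧ isIdentB (l.drop 1) = true then l.drop 1
  else
    let k := countCoreB l
    if k = 0 then ERRORs
    else
      -- 'if k < len(s) and s[k] in "$!": k += 1' (k < len(s) ↔ s[k]? is some)
      let k' := if l[k]?.elim false (fun c => c == '$' || c == '!') then k + 1 else k
      suffixB l (l.take k')

def Getident_alt (s : String) : String := String.ofList (GetidentAltL s.toList)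

-- ===== PRECONDITION & SPEC =====
-- Pre_ excludes exactly the strings starting with an unterminated single quote, on which A raises IndexError.
def Pre_Getident (s : String) : Prop :=
  s.toList.take 1 = ['\''] → '\'' ∈ s.toList.drop 1
instance (s : String) : Decidable (Pre_Getident s) := by unfold Pre_Getident; infer_instance

def pvWitness_Getident : String := "abc def"

-- On strings starting with a single quote that never closes, A raises IndexError; B returns 'ERROR'.
def Raises_Getident (s : String) : Prop :=
  s.toList.take 1 = ['\''] ∧ '\'' ∉ s.toList.drop 1
instance (s : String) : Decidable (Raises_Getident s) := by unfold Raises_Getident; infer_instance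
def pvRaiseWitness_Getident : String := "'a"
def pvRaiseWitnessOut_Getident : String := "ERROR"

-- On inputs whose leading identifier token is exactly 'ERROR' followed by a terminated double-quoted
-- segment, A returns 'ERROR' (the token collides with A's in-band error sentinel, so the suffix is
-- dropped); B returns the full token with its quoted suffix, which is the intended value.
def D_Getident (s : String) : Prop :=
  s.toList.take 5 = ERRORs ∧ s.toList[5]? = some '"' ∧ '"' ∈ s.toList.drop 6
instance (s : String) : Decidable (D_Getident s) := by unfold D_Getident; infer_instance

def Spec_Getident (s : String) (out : String) : Prop := ¬ D_Getident s → out = Getident_alt s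
instance (s : String) (out : String) : Decidable (Spec_Getident s out) := by unfold Spec_Getident; infer_instance

def pvDiffWitness_Getident : String := "ERROR\"x\""
def pvDiffWitnessOut_Getident : String × String := ("ERROR", "ERROR\"x\"")

-- ===== CLAIM (what is proved, stated in full; the proofs are below) =====
def Claim_unchanged_Getident : Prop := ∀ (s : String), Dom_Getident s → Pre_Getident s → Spec_Getident s (Getident s)
def Claim_changed_Getident : Prop := Dom_Getident (pvDiffWitness_Getident) ∧ Pre_Getident (pvDiffWitness_Getident) ∧ D_Getident (pvDiffWitness_Getident) ∧ Getident (pvDiffWitness_Getident) = pvDiffWitnessOut_Getident.1 ∧ Getident_alt (pvDiffWitness_Getident) = pvDiffWitnessOut_Getident.2 ∧ pvDiffWitnessOut_Getident.1 ≠ pvDiffWitnessOut_Getident.2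
def Claim_exact_Getident : Prop := ∀ (s : String), Dom_Getident s → Pre_Getident s → D_Getident s → Getident s ≠ Getident_alt s
def Claim_raises_Getident : Prop := (∀ (s : String), Dom_Getident s → Raises_Getident s → ¬ Pre_Getident s) ∧ (Dom_Getident (pvRaiseWitness_Getident) ∧ Raises_Getident (pvRaiseWitness_Getident) ∧ Getident_alt (pvRaiseWitness_Getident) = pvRaiseWitnessOut_Getident)

-- ===== LEMMAS AND PROOFS =====


-- proof-side: length of the token B extracts (0 = no token)
def extC : List Char → Nat
  | [] => 0
  | c :: t => if coreB c then extC t + 1 else if c = '$' ∨ c = '!' then 1 else 0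

def extF : List Char → Nat
  | [] => 0
  | c :: t => if coreB c then extC t + 1 else 0

theorem coreA_eq (c : Char) :
    (isdigitA c || isupperA c || islowerA c || (c == '#')) = coreB c := by
  simp [isdigitA, isupperA, islowerA, coreB, Bool.and_comm]

theorem core_not_special {c : Char} (h : coreB c = true) : (c == '$' || c == '!') = false := by
  rcases eq_or_ne c '$' with rfl | h1
  · exact absurd h (by decide)
  rcases eq_or_ne c '!' with rfl | h2
  · exact absurd h (by decide)
  simp [h1, h2]

theorem extC_le (t : List Char) : extC t ≤ t.length := by
  induction t with
  | nil => simp [extC]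
  | cons c t ih => simp only [extC, List.length_cons]; split_ifs <;> omega

theorem extF_le (l : List Char) : extF l ≤ l.length := by
  cases l with
  | nil => simp [extF]
  | cons c t => have := extC_le t; simp only [extF, List.length_cons]; split_ifs <;> omega

theorem isIdentB_cons₂ (c d e : Char) (r : List Char) :
    isIdentB (c :: d :: e :: r) = (coreB c && isIdentB (d :: e :: r)) := by
  simp only [isIdentB, List.getLast?_cons_cons, List.dropLast_cons₂, List.all_cons,
    List.length_cons]
  cases hg : (e :: r).getLast? with
  | none => simp at hg
  | some x => simp [Bool.and_assoc]

theorem ident_eq (t : List Char) : isidentA t = isIdentB t := by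
  induction t with
  | nil => simp [isidentA, isIdentB]
  | cons c rest ih =>
    cases rest with
    | nil => simp [isidentA, isIdentB, coreA_eq]
    | cons d r2 =>
      cases r2 with
      | nil =>
        simp only [isidentA, isIdentB, coreA_eq, List.length_cons, List.length_nil,
          List.headD_cons, List.getLast?_cons_cons, List.getLast?_singleton,
          List.dropLast_cons₂, List.all_cons]
        simp [Bool.or_comm, Bool.and_comm]
      | cons e r3 =>
        rw [isIdentB_cons₂, ← ih]
        simp only [isidentA, coreA_eq, List.length_cons]
        simp

theorem ident_head_core {c : Char} {t : List Char} (h : isidentA (c :: t) = true) :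
    coreB c = true := by
  simp only [isidentA, Bool.and_eq_true] at h
  rcases h with ⟨h1, -⟩
  rwa [coreA_eq] at h1

theorem ident_cons_false {d : Char} (u : List Char) (hd : coreB d = false) :
    isidentA (d :: u) = false := by
  simp [isidentA, coreA_eq, hd]

theorem take_ident_iff (l : List Char) : ∀ (n : Nat), 1 ≤ n →
    (isidentA (l.take n) = true ↔ 1 ≤ min n l.length ∧ min n l.length ≤ extF l) := by
  induction l with
  | nil => intro n hn; simp [isidentA]
  | cons c t ih =>
    intro n hn
    obtain ⟨m, rfl⟩ : ∃ m, n = m + 1 := ⟨n - 1, by omega⟩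
    rw [List.take_succ_cons]
    by_cases hc : coreB c = true
    · have hF : extF (c :: t) = extC t + 1 := by simp [extF, hc]
      simp only [isidentA, coreA_eq, hc, Bool.true_and, List.length_cons, hF]
      cases t with
      | nil => simp
      | cons d t' =>
        cases m with
        | zero => simp
        | succ m' =>
          rw [List.take_succ_cons]
          simp only [List.length_cons, List.length_take, List.headD_cons]
          by_cases hd : coreB d = true
          · have hds := core_not_special hd
            have hC : extC (d :: t') = extC t' + 1 := by simp [extC, hd]
            have hih := ih (m' + 1) (by omega)
            rw [List.take_succ_cons] at hih
            simp only [List.length_cons, extF, hd, if_pos] at hih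
            rw [hC]
            simp only [hds, Bool.and_false]
            constructor
            · intro hh
              simp only [Bool.or_eq_true, decide_eq_true_eq, Bool.false_eq_true, or_false] at hh
              rcases hh with hh1 | hh1
              · omega
              · have := hih.1 hh1
                omega
            · intro hh
              have : isidentA (d :: List.take m' t') = true := hih.2 ⟨by omega, by omega⟩
              simp [this]
          · have hA0 : isidentA (d :: List.take m' t') = false :=
              ident_cons_false _ (by simpa using hd)
            by_cases hsp : d = '$' ∨ d = '!'
            · have hC : extC (d :: t') = 1 := by simp [extC, hd, hsp]
              have hspb : (d == '$' || d == '!') = true := by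
                rcases hsp with rfl | rfl <;> simp
              rw [hC]
              simp only [hspb, Bool.and_true, hA0, Bool.or_false]
              constructor
              · intro hh
                simp only [Bool.or_eq_true, decide_eq_true_eq] at hh
                rcases hh with hh1 | hh1
                · omega
                · rcases (by omega : m' = 0 ∨ t'.length = 0) with h | h <;> omega
              · intro hh
                have h0 : min m' t'.length = 0 := by omega
                simp [h0]
            · have hC : extC (d :: t') = 0 := by simp [extC, hd, hsp]
              have hspb : (d == '$' || d == '!') = false := by
                simp only [Bool.or_eq_false_iff, beq_eq_false_iff_ne]
                exact ⟨fun h => hsp (Or.inl h), fun h => hsp (Or.inr h)⟩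
              rw [hC]
              simp only [hspb, Bool.and_false, hA0, Bool.or_false]
              constructor
              · intro hh; simp at hh
              · intro hh; omega
    · have hcf : coreB c = false := by simpa using hc
      have hF : extF (c :: t) = 0 := by simp [extF, hcf]
      rw [ident_cons_false _ hcf, hF]
      simp

theorem ident_iff (l : List Char) :
    isidentA l = true ↔ 1 ≤ l.length ∧ l.length ≤ extF l := by
  cases l with
  | nil => simp [isidentA]
  | cons c t =>
    have := take_ident_iff (c :: t) (c :: t).length (by simp)
    rw [List.take_length] at this
    simpa using this


theorem ident_last {t : List Char} {c : Char} (h : isidentA t = true)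
    (hl : t.getLast? = some c) : (coreB c || c == '$' || c == '!') = true := by
  rw [ident_eq] at h
  unfold isIdentB at h
  rw [hl] at h
  rw [Bool.and_eq_true, Bool.or_eq_true] at h
  rcases h.2 with h2 | h2
  · simp [h2]
  · rw [Bool.and_eq_true, Bool.or_eq_true] at h2
    rcases h2.2 with h3 | h3 <;> simp [h3]

theorem ident_run {t : List Char} (h : isidentA t = true) (fuel n : Nat) :
    Getident0A (fuel + 1) t n = t := by
  cases t with
  | nil => simp [isidentA] at h
  | cons c t' =>
    have hc := ident_head_core h
    have h1 : ¬ (c :: t').take 1 = ['\''] := by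
      simp only [List.take_succ_cons, List.take_zero]
      intro he
      have : c = '\'' := by simpa using he
      subst this; exact absurd hc (by decide)
    have h2 : ¬ ((c :: t').take 1 = ['~'] ∧ isidentA ((c :: t').drop 1) = true) := by
      rintro ⟨he, -⟩
      have : c = '~' := by simpa using he
      subst this; exact absurd hc (by decide)
    simp only [Getident0A]
    rw [if_neg h1, if_neg h2, if_pos h]

theorem loop_lemma (fuel : Nat) : ∀ (l : List Char) (n : Nat),
    l.take 1 ≠ ['\''] → ¬ (l.take 1 = ['~'] ∧ isidentA (l.drop 1) = true) →
    1 ≤ n → n ≤ extF l → l.length + 2 ≤ n + fuel →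
    Getident0A fuel l n = l.take (extF l) := by
  induction fuel with
  | zero =>
    intro l n _ _ h1 hn hf
    have := extF_le l
    omega
  | succ fuel ih =>
    intro l n hq ht h1 hn hf
    have hEle := extF_le l
    simp only [Getident0A]
    rw [if_neg hq, if_neg ht]
    by_cases hid : isidentA l = true
    · rw [if_pos hid]
      have hi := (ident_iff l).1 hid
      have : extF l = l.length := by omega
      rw [this, List.take_length]
    · rw [if_neg hid]
      have hlt : extF l < l.length := by
        rcases Nat.lt_or_ge (extF l) l.length with h | h
        · exact h
        · exact absurd ((ident_iff l).2 ⟨by omega, by omega⟩) hid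
      have ht4 : isidentA (l.take n) = true :=
        (take_ident_iff l n h1).2 ⟨by omega, by omega⟩
      rw [if_neg (by simp [ht4])]
      by_cases h5 : n + 1 ≤ extF l
      · have ht5 : isidentA (l.take (n + 1)) = true :=
          (take_ident_iff l (n + 1) (by omega)).2 ⟨by omega, by omega⟩
        rw [if_neg (by simp [ht5])]
        exact ih l (n + 1) hq ht (by omega) h5 (by omega)
      · have hnx : n = extF l := by omega
        have ht5 : ¬ isidentA (l.take (n + 1)) = true := by
          rw [take_ident_iff l (n + 1) (by omega)]
          omega
        rw [if_pos ht5, hnx]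

theorem ext0_lemma (fuel : Nat) (l : List Char) (h0 : extF l = 0)
    (hq : l.take 1 ≠ ['\'']) (ht : ¬ (l.take 1 = ['~'] ∧ isidentA (l.drop 1) = true)) :
    Getident0A (fuel + 1) l 1 = ERRORs := by
  simp only [Getident0A]
  rw [if_neg hq, if_neg ht]
  have hid : ¬ isidentA l = true := by rw [ident_iff]; omega
  rw [if_neg hid]
  have ht4 : ¬ isidentA (l.take 1) = true := by
    rw [take_ident_iff l 1 (by omega)]
    omega
  rw [if_pos ht4]

theorem cnt0_iff (l : List Char) : countCoreB l = 0 ↔ extF l = 0 := by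
  cases l with
  | nil => simp [countCoreB, extF]
  | cons c t =>
    by_cases hc : coreB c = true <;> simp [countCoreB, extF, hc]

theorem cntS (t : List Char) :
    countCoreB t + (t[countCoreB t]?.elim 0 (fun c => if c == '$' || c == '!' then 1 else 0)) = extC t := by
  induction t with
  | nil => simp [countCoreB, extC]
  | cons c t' ih =>
    by_cases hc : coreB c = true
    · simp only [countCoreB, extC, hc, if_pos, List.getElem?_cons_succ]
      omega
    · have hc' : coreB c = false := by simpa using hc
      simp only [countCoreB, extC, hc', Bool.false_eq_true, if_false, List.getElem?_cons_zero]
      by_cases hsp : c = '$' ∨ c = '!'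
      · simp [hsp]
      · simp [hsp]

theorem kprime (l : List Char) (h : countCoreB l ≠ 0) :
    (if l[countCoreB l]?.elim false (fun c => c == '$' || c == '!') then countCoreB l + 1
     else countCoreB l) = extF l := by
  cases l with
  | nil => simp [countCoreB] at h
  | cons c t =>
    have hc : coreB c = true := by
      by_contra hcf
      simp [countCoreB, Bool.not_eq_true _ ▸ hcf] at h
    have hS := cntS t
    have hcc : countCoreB (c :: t) = countCoreB t + 1 := by simp [countCoreB, hc]
    have hEF : extF (c :: t) = extC t + 1 := by simp [extF, hc]
    rw [hcc, hEF, List.getElem?_cons_succ]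
    cases hx : t[countCoreB t]? with
    | none => simp only [hx, Option.elim_none, Bool.false_eq_true, if_false] at hS ⊢; omega
    | some d =>
      simp only [hx, Option.elim_some] at hS ⊢
      by_cases hd : (d == '$' || d == '!') = true
      · simp only [hd, if_pos] at hS ⊢; omega
      · simp only [Bool.not_eq_true _ ▸ hd, Bool.false_eq_true, if_false] at hS ⊢; omega

theorem singleton_prefix_iff {q : Char} {u : List Char} : [q] <+: u ↔ u.head? = some q := by
  cases u with
  | nil => simp
  | cons c t =>
    rw [List.cons_prefix_cons]
    simp [eq_comm]

theorem takeWhile_length_of_first {t : List Char} {q : Char} : ∀ {j : Nat},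
    t[j]? = some q → (∀ i, i < j → t[i]? ≠ some q) →
    (t.takeWhile (fun c => !(c == q))).length = j := by
  induction t with
  | nil => intro j hj _; simp at hj
  | cons c t' ih =>
    intro j hj hmin
    cases j with
    | zero =>
      simp only [List.getElem?_cons_zero, Option.some_inj] at hj
      subst hj
      simp
    | succ i' =>
      have hc : c ≠ q := by
        intro rfl'
        exact hmin 0 (by omega) (by simp [rfl'])
      rw [List.getElem?_cons_succ] at hj
      have hmin' : ∀ i, i < i' → t'[i]? ≠ some q := by
        intro i hi
        have := hmin (i + 1) (by omega)
        rwa [List.getElem?_cons_succ] at this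
      simp only [List.takeWhile_cons, beq_eq_false_iff_ne.2 hc, Bool.not_false, if_pos,
        List.length_cons]
      exact congrArg (· + 1) (ih hj hmin')

theorem find_eq_first {t : List Char} {q : Char} (h : q ∈ t) :
    PySem.Chars.find t [q] = ((t.takeWhile (fun c => !(c == q))).length : Int) := by
  have h0 : 0 ≤ PySem.Chars.find t [q] :=
    (PySem.Chars.find_nonneg_iff t [q]).2 ((List.singleton_infix_iff q t).2 h)
  obtain ⟨hpre, hmin⟩ := PySem.Chars.find_spec h0
  have hj : t[(PySem.Chars.find t [q]).toNat]? = some q := by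
    rw [← List.head?_drop]
    exact singleton_prefix_iff.1 hpre
  have hmin' : ∀ i, i < (PySem.Chars.find t [q]).toNat → t[i]? ≠ some q := by
    intro i hi hsome
    exact hmin i hi (singleton_prefix_iff.2 (by rw [List.head?_drop]; exact hsome))
  rw [takeWhile_length_of_first hj hmin', Int.toNat_of_nonneg h0]

theorem getElem_takeWhile_length {t : List Char} {q : Char} (h : q ∈ t) :
    t[(t.takeWhile (fun c => !(c == q))).length]? = some q := by
  induction t with
  | nil => simp at h
  | cons c t' ih =>
    by_cases hc : c = q
    · subst hc
      simp
    · have hm : q ∈ t' := by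
        rcases List.mem_cons.1 h with rfl | hm
        · exact absurd rfl hc
        · exact hm
      simp only [List.takeWhile_cons, beq_eq_false_iff_ne.2 hc, Bool.not_false, if_pos,
        List.length_cons, List.getElem?_cons_succ]
      exact ih hm

theorem takeWhile_length_lt {t : List Char} {q : Char} (h : q ∈ t) :
    (t.takeWhile (fun c => !(c == q))).length < t.length := by
  have := getElem_takeWhile_length h
  exact (List.getElem?_eq_some_iff.1 this).1

theorem scanRR_eq (rr : List Char) : scanRRA rr = rr.dropWhile (fun c => !(c == '"')) := by
  induction rr with
  | nil => rw [scanRRA]; simp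
  | cons c t ih =>
    rw [scanRRA]
    by_cases hc : c = '"'
    · subst hc; simp
    · simp only [List.dropWhile_cons, beq_eq_false_iff_ne.2 hc, Bool.not_false, if_pos]
      simpa [hc] using ih

theorem scanQ (l : List Char) (i : Nat) :
    scanQuoteA l i = i + ((l.drop i).takeWhile (fun c => !(c == '\''))).length := by
  fun_induction scanQuoteA l i with
  | case1 i h ih =>
    rcases h with ⟨hlt, hne⟩
    rw [ih]
    have hd : l.drop i = l[i] :: l.drop (i + 1) := (List.getElem_cons_drop hlt).symm
    have hci : l[i] ≠ '\'' := by
      intro he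
      exact hne (by rw [List.getElem?_eq_getElem hlt, he])
    rw [hd]
    simp only [List.takeWhile_cons, beq_eq_false_iff_ne.2 hci, Bool.not_false, if_pos,
      List.length_cons]
    omega
  | case2 i h =>
    rcases Decidable.not_and_iff_or_not.1 h with h1 | h2
    · have : l.length ≤ i := by omega
      rw [List.drop_eq_nil_of_le this]
      simp
    · have h2' : l[i]? = some '\'' := by
        by_contra hne
        exact h2 hne
      have hlt : i < l.length := (List.getElem?_eq_some_iff.1 h2').1
      have hd : l.drop i = l[i] :: l.drop (i + 1) := (List.getElem_cons_drop hlt).symm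
      have : l[i] = '\'' := by
        rw [List.getElem?_eq_getElem hlt] at h2'
        exact Option.some_inj.1 h2'
      rw [hd]
      simp [this]

theorem dropWhile_ne_nil_of_mem {t : List Char} {q : Char} (hm : q ∈ t) :
    t.dropWhile (fun c => !(c == q)) ≠ [] := by
  intro he
  have := List.dropWhile_eq_nil_iff.1 he q hm
  simp at this

theorem suffix_eq (l a : List Char) :
    (let R := l.drop a.length
     if ¬ R.take 1 = ['"'] then a
     else
       let RR := scanRRA (R.drop 1)
       if RR = [] then ERRORs
       else a ++ R.take (R.length - RR.length + 1)) = suffixB l a := by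
  simp only [suffixB]
  rcases hdrop : l.drop a.length with _ | ⟨c, t⟩
  · simp
  · by_cases hc : c = '"'
    · subst hc
      have hnn : ¬ (('"' :: t).take 1 ≠ (['"'] : List Char)) := by simp
      rw [if_neg hnn, if_neg hnn]
      have hlen : (1 : Nat) ≤ ('"' :: t).length := by simp
      have hff := PySem.Chars.findFrom_natCast ('"' :: t) ['"'] 1 hlen
      rw [Nat.cast_one] at hff
      simp only [List.drop_succ_cons, List.drop_zero] at hff
      rw [scanRR_eq, hff]
      simp only [List.drop_succ_cons, List.drop_zero]
      by_cases hm : '"' ∈ t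
      · have hfind := find_eq_first (t := t) (q := '"') hm
        have hwlt : (t.takeWhile (fun c => !(c == '"'))).length < t.length :=
          takeWhile_length_lt hm
        have hdw := congrArg List.length
          (List.takeWhile_append_dropWhile (p := fun c => !(c == '"')) (l := t))
        rw [List.length_append] at hdw
        rw [if_neg (dropWhile_ne_nil_of_mem hm), hfind]
        rw [if_neg (by omega : ¬(((t.takeWhile (fun c => !(c == '"'))).length : Int) = -1))]
        rw [if_neg (by omega : ¬((1 + ((t.takeWhile (fun c => !(c == '"'))).length : Int)) = -1))]
        have h2 : (1 + (((t.takeWhile (fun c => !(c == '"'))).length : Nat) : Int)).toNat + 1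
            = (t.takeWhile (fun c => !(c == '"'))).length + 2 := by omega
        have h3 : ('"' :: t).length - (t.dropWhile (fun c => !(c == '"'))).length + 1
            = (t.takeWhile (fun c => !(c == '"'))).length + 2 := by
          simp only [List.length_cons]
          omega
        rw [h2, h3]
      · have hRR : t.dropWhile (fun c => !(c == '"')) = [] :=
          List.dropWhile_eq_nil_iff.2 (by
            intro x hx
            have : x ≠ '"' := fun he => hm (he ▸ hx)
            simp [this])
        have hfind : PySem.Chars.find t ['"'] = -1 :=
          (PySem.Chars.find_eq_neg_one_iff t ['"']).2 (by
            rw [List.singleton_infix_iff]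
            exact hm)
        rw [hRR, hfind]
        simp
    · have hne : (c :: t).take 1 ≠ (['"'] : List Char) := by simp [hc]
      rw [if_pos hne, if_pos hne]

theorem main_eq (l : List Char)
    (hpre : l.take 1 = ['\''] → '\'' ∈ l.drop 1)
    (hnd : ¬ (l.take 5 = ERRORs ∧ l[5]? = some '"' ∧ '"' ∈ l.drop 6)) :
    GetidentL l = GetidentAltL l := by
  by_cases hq : l.take 1 = ['\'']
  · -- leading single quote, terminated by Pre_
    cases l with
    | nil => simp at hq
    | cons c t =>
    have hc : c = '\'' := by simpa using hq
    subst hc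
    have hm : '\'' ∈ t := by simpa using hpre hq
    have hwmem := getElem_takeWhile_length (t := t) (q := '\'') hm
    have hwlt : (t.takeWhile (fun c => !(c == '\''))).length < t.length :=
      takeWhile_length_lt hm
    have hscan : scanQuoteA ('\'' :: t) 1 = 1 + (t.takeWhile (fun c => !(c == '\''))).length := by
      rw [scanQ]
      simp
    have hidx : ('\'' :: t)[1 + (t.takeWhile (fun c => !(c == '\''))).length]? = some '\'' := by
      rw [show 1 + (t.takeWhile (fun c => !(c == '\''))).length
          = (t.takeWhile (fun c => !(c == '\''))).length + 1 by omega, List.getElem?_cons_succ]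
      exact hwmem
    have htokA : Getident0A (('\'' :: t).length + 2) ('\'' :: t) 1
        = ('\'' :: t).take (1 + (t.takeWhile (fun c => !(c == '\''))).length + 1) := by
      rw [show ('\'' :: t).length + 2 = (t.length + 2) + 1 from rfl]
      simp only [Getident0A]
      rw [if_pos (by simp)]
      simp only [hscan, hidx]
      simp
    have hff := PySem.Chars.findFrom_natCast ('\'' :: t) ['\''] 1 (by simp)
    rw [Nat.cast_one] at hff
    simp only [List.drop_succ_cons, List.drop_zero] at hff
    rw [find_eq_first hm] at hff
    rw [if_neg (by omega : ¬(((t.takeWhile (fun c => !(c == '\''))).length : Int) = -1))] at hff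
    simp only [GetidentL, GetidentAltL]
    rw [htokA, if_pos hq, hff]
    rw [if_neg (by omega : ¬(1 + ((t.takeWhile (fun c => !(c == '\''))).length : Int) = -1))]
    have hA_ne : ('\'' :: t).take (1 + (t.takeWhile (fun c => !(c == '\''))).length + 1)
        ≠ ERRORs := by
      rw [show 1 + (t.takeWhile (fun c => !(c == '\''))).length + 1
          = ((t.takeWhile (fun c => !(c == '\''))).length + 1) + 1 by omega,
        List.take_succ_cons]
      simp [ERRORs]
    rw [if_neg hA_ne]
    have h2 : (1 + ((t.takeWhile (fun c => !(c == '\''))).length : Int)).toNat + 1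
        = 1 + (t.takeWhile (fun c => !(c == '\''))).length + 1 := by omega
    rw [h2]
    exact suffix_eq ('\'' :: t)
      (('\'' :: t).take (1 + (t.takeWhile (fun c => !(c == '\''))).length + 1))
  · by_cases ht : l.take 1 = ['~'] ∧ isidentA (l.drop 1) = true
    · -- '~' followed by a full identifier
      obtain ⟨ht1, hid⟩ := ht
      cases l with
      | nil => simp at ht1
      | cons c t =>
      have hc : c = '~' := by simpa using ht1
      subst hc
      have hid' : isidentA t = true := by simpa using hid
      have htokA : Getident0A (('~' :: t).length + 2) ('~' :: t) 1 = t := by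
        rw [show ('~' :: t).length + 2 = (t.length + 2) + 1 from rfl]
        simp only [Getident0A]
        rw [if_neg hq, if_pos ⟨by simp, by simpa using hid⟩]
        exact ident_run hid' (t.length + 1) 1
      have hB : GetidentAltL ('~' :: t) = t := by
        simp only [GetidentAltL]
        rw [if_neg hq, if_pos ⟨by simp, by rw [← ident_eq]; simpa using hid⟩]
        simp
      rw [hB]
      simp only [GetidentL]
      rw [htokA]
      by_cases hE : t = ERRORs
      · rw [if_pos hE, hE]
      · rw [if_neg hE]
        have htne : t ≠ [] := by
          intro h
          subst h
          simp [isidentA] at hid'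
        have hlen1 : 1 ≤ t.length := List.length_pos_of_ne_nil htne
        have hdropR : ('~' :: t).drop t.length = [t.getLast htne] := by
          rw [show t.length = (t.length - 1) + 1 by omega, List.drop_succ_cons]
          exact List.drop_length_sub_one htne
        have hlast := ident_last hid' (List.getLast?_eq_some_getLast htne)
        have hlq : t.getLast htne ≠ '"' := by
          intro he
          rw [he] at hlast
          exact absurd hlast (by decide)
        rw [hdropR, if_pos (by simp [hlq])]
    · -- identifier-token case
      have ht' : ¬ (l.take 1 = ['~'] ∧ isIdentB (l.drop 1) = true) := by
        rw [← ident_eq]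
        exact ht
      simp only [GetidentL, GetidentAltL]
      rw [if_neg hq, if_neg ht']
      by_cases h0 : countCoreB l = 0
      · rw [if_pos h0]
        have hx0 : extF l = 0 := (cnt0_iff l).1 h0
        have htokA : Getident0A (l.length + 2) l 1 = ERRORs := by
          rw [show l.length + 2 = (l.length + 1) + 1 from rfl]
          exact ext0_lemma _ l hx0 hq ht
        rw [htokA, if_pos rfl]
      · rw [if_neg h0]
        have hx1 : extF l ≠ 0 := fun h => h0 ((cnt0_iff l).2 h)
        have htokA : Getident0A (l.length + 2) l 1 = l.take (extF l) :=
          loop_lemma (l.length + 2) l 1 hq ht (by omega) (by omega) (by omega)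
        rw [htokA, kprime l h0]
        by_cases hE : l.take (extF l) = ERRORs
        · rw [if_pos hE]
          have hlen5 : min (extF l) l.length = 5 := by
            rw [← List.length_take, hE]
            rfl
          have hext5 : extF l = 5 := by
            have := extF_le l
            omega
          rw [hext5] at hE ⊢
          rw [hE]
          simp only [suffixB]
          rw [show (ERRORs : List Char).length = 5 from rfl]
          rcases hd5 : l.drop 5 with _ | ⟨c5, t5⟩
          · simp
          · by_cases hc5 : c5 = '"'
            · subst hc5
              have hl5 : l[5]? = some '"' := by
                rw [show (5 : Nat) = 5 + 0 from rfl, ← List.getElem?_drop, hd5]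
                rfl
              have hnmem : ¬ '"' ∈ l.drop 6 := by
                intro hmem
                exact hnd ⟨hE, hl5, hmem⟩
              have ht5 : l.drop 6 = t5 := by
                have h66 := congrArg (List.drop 1) hd5
                rw [List.drop_drop] at h66
                simpa using h66
              rw [ht5] at hnmem
              rw [if_neg (by simp : ¬(('"' :: t5).take 1 ≠ (['"'] : List Char)))]
              have hff := PySem.Chars.findFrom_natCast ('"' :: t5) ['"'] 1 (by simp)
              rw [Nat.cast_one] at hff
              simp only [List.drop_succ_cons, List.drop_zero] at hff
              have hfind : PySem.Chars.find t5 ['"'] = -1 :=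
                (PySem.Chars.find_eq_neg_one_iff t5 ['"']).2 (by
                  rw [List.singleton_infix_iff]
                  exact hnmem)
              rw [hfind] at hff
              rw [if_pos rfl] at hff
              rw [hff, if_pos rfl]
            · rw [if_pos (by simp [hc5] : (c5 :: t5).take 1 ≠ (['"'] : List Char))]
        · rw [if_neg hE]
          exact suffix_eq l (l.take (extF l))


-- ===== VERDICT (by name: the statement is the Claim_ definition above) =====
theorem Getident_spec : Claim_unchanged_Getident := by
  intro s _ hpre hnd
  show Getident s = Getident_alt s
  unfold Getident Getident_alt
  exact congrArg String.ofList (main_eq s.toList hpre (by unfold D_Getident at hnd; simpa [ERRORs] using hnd))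
theorem Getident_changed : Claim_changed_Getident := by unfold Claim_changed_Getident; decide
theorem Getident_tight : Claim_exact_Getident := by
  intro s _ _ hd
  simp only [D_Getident] at hd
  obtain ⟨h5, hl5, hmem⟩ := hd
  unfold Getident Getident_alt
  intro heq
  have heql : GetidentL s.toList = GetidentAltL s.toList := by
    have := congrArg String.toList heq
    simpa using this
  have h0 : (s.toList.drop 5)[0]? = s.toList[5]? := by simp [List.getElem?_drop]
  rcases hd5 : s.toList.drop 5 with _ | ⟨c5, t5⟩
  · rw [hd5, hl5] at h0
    simp at h0
  · have hc5 : c5 = '"' := by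
      rw [hd5, hl5] at h0
      simpa using h0
    subst hc5
    have ht5 : s.toList.drop 6 = t5 := by
      have h66 := congrArg (List.drop 1) hd5
      rw [List.drop_drop] at h66
      simpa using h66
    have hmem' : '"' ∈ t5 := ht5 ▸ hmem
    have hldec : s.toList = 'E' :: 'R' :: 'R' :: 'O' :: 'R' :: '"' :: t5 := by
      have hsplit := (List.take_append_drop 5 s.toList).symm
      rw [h5, hd5] at hsplit
      simpa [ERRORs] using hsplit
    have hqne : s.toList.take 1 ≠ (['\''] : List Char) := by rw [hldec]; simp
    have htne : ¬ (s.toList.take 1 = ['~'] ∧ isidentA (s.toList.drop 1) = true) := by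
      rw [hldec]; simp
    have hext : extF s.toList = 5 := by rw [hldec]; simp [extF, extC, coreB]
    have htokA : Getident0A (s.toList.length + 2) s.toList 1 = s.toList.take (extF s.toList) :=
      loop_lemma _ _ 1 hqne htne (by omega) (by omega) (by omega)
    have hAval : GetidentL s.toList = ERRORs := by
      simp only [GetidentL]
      rw [htokA, hext, show s.toList.take 5 = ERRORs from h5, if_pos rfl]
    have hcnt : countCoreB s.toList = 5 := by rw [hldec]; simp [countCoreB, coreB]
    have hAltval : ∃ m, GetidentAltL s.toList = ERRORs ++ ('"' :: (t5.take m)) := by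
      simp only [GetidentAltL]
      rw [if_neg hqne, if_neg (by rw [← ident_eq]; exact htne), hcnt]
      rw [if_neg (by omega : ¬(5 : Nat) = 0), hl5]
      simp only [Option.elim_some]
      rw [if_neg (by decide), show s.toList.take 5 = ERRORs from h5]
      simp only [suffixB]
      rw [show (ERRORs : List Char).length = 5 from rfl, hd5]
      rw [if_neg (by simp : ¬(('"' :: t5).take 1 ≠ (['"'] : List Char)))]
      have hff := PySem.Chars.findFrom_natCast ('"' :: t5) ['"'] 1 (by simp)
      rw [Nat.cast_one] at hff
      simp only [List.drop_succ_cons, List.drop_zero] at hff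
      rw [find_eq_first hmem'] at hff
      rw [if_neg (by omega : ¬(((t5.takeWhile (fun c => !(c == '"'))).length : Int) = -1))] at hff
      rw [hff]
      rw [if_neg (by omega : ¬(1 + ((t5.takeWhile (fun c => !(c == '"'))).length : Int) = -1))]
      refine ⟨(1 + ((t5.takeWhile (fun c => !(c == '"'))).length : Int)).toNat, ?_⟩
      rw [List.take_succ_cons]
    obtain ⟨m, hAltval⟩ := hAltval
    rw [hAval, hAltval] at heql
    have hlenc := congrArg List.length heql
    simp [ERRORs] at hlenc
@[simp] theorem Getident_raises : Claim_raises_Getident := by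
  unfold Claim_raises_Getident
  refine ⟨?_, by decide⟩
  intro s _ hr hp
  exact hr.2 (hp hr.1)
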